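-- pv_equiv track=rewrite | github.com/Semen-prog/aesc_machine_learning | homework_1/functions.py | max_after_zero
-- ===== SOURCE A (Python) =====
-- def max_after_zero(x):
--     ind = -1
--     for i in range(1, len(x)):
--         if x[i - 1] != 0:
--             continue
--         if ind == -1 or x[ind] < x[i]:
--             ind = i
--     if ind == -1:
--         return None
--     return x[ind]
-- ===== SOURCE B (Python) =====
-- def max_after_zero(x):
--     # divide and conquer: rec(lo, hi) = max of x[i] for lo < i < hi with x[i-1] == 0, else None
--     def rec(lo, hi):
--         if hi - lo < 2:
--             return None
--         if hi - lo == 2: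
--             return x[lo + 1] if x[lo] == 0 else None
--         mid = (lo + hi) // 2
--         left = rec(lo, mid + 1)
--         right = rec(mid, hi)
--         if left is None:
--             return right
--         if right is None:
--             return left
--         return max(left, right)
--     return rec(0, len(x))
-- ===== Notes on version B (the rewrite author's own statement) =====
-- stated objective: alternative
-- what changed: Replaces A's single left-to-right index-tracking scan with a divide-and-conquer recursion on index intervals: each interval of length >= 3 is split at its midpoint, the two halves' answers (max candidate after a zero, or None) are computed recursively and combined with max, with a direct base case for intervals of length 2.
import Mathlib
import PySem

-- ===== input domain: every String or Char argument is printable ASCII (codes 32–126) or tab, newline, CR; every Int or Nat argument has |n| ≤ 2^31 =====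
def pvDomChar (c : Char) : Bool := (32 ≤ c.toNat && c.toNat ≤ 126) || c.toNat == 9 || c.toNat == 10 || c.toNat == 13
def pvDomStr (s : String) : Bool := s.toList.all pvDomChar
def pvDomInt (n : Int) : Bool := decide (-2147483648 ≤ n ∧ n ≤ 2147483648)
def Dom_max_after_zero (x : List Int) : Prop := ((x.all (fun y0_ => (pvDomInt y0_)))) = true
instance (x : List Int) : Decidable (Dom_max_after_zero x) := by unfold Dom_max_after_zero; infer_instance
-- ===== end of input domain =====

-- B replaces A's left-to-right index-tracking scan by a divide-and-conquer recursion on index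
-- intervals (combine the two halves' answers with max); objective: alternative, same O(n) cost.

-- ===== PORT A =====
-- the body of A's for-loop (state: the index `ind`)
def mazStep (x : List Int) (ind i : Int) : Int :=
  if PySem.List.pyGetD x (i - 1) 0 ≠ 0 then ind
  else if ind = -1 ∨ PySem.List.pyGetD x ind 0 < PySem.List.pyGetD x i 0 then i else ind

def max_after_zero (x : List Int) : Option Int :=
  let ind := (PySem.List.pyRange 1 (x.length : Int) 1).foldl (mazStep x) (-1)
  if ind = -1 then none else PySem.List.pyGet? x ind

-- ===== PORT B =====
-- rec(lo, hi): max of x[i] for lo < i < hi with x[i-1] == 0, or None.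
-- (indices reached by the recursion are always in range, so pyGetD's default is never used)
def mazRec (x : List Int) (lo hi : Int) : Option Int :=
  if hi - lo < 2 then none
  else if hi - lo = 2 then
    (if PySem.List.pyGetD x lo 0 = 0 then some (PySem.List.pyGetD x (lo + 1) 0) else none)
  else
    let mid := PySem.Int.floordiv (lo + hi) 2
    let left := mazRec x lo (mid + 1)
    let right := mazRec x mid hi
    match left, right with
    | none, r => r
    | some a, none => some a
    | some a, some b => some (max a b)
termination_by (hi - lo).toNat
decreasing_by
  all_goals
    (rw [PySem.Int.floordiv_eq_ediv_of_pos (by omega : (0:Int) < 2)]; omega)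

def max_after_zero_alt (x : List Int) : Option Int := mazRec x 0 (x.length : Int)

-- ===== PRECONDITION & SPEC =====
def Spec_max_after_zero (x : List Int) (out : Option Int) : Prop := out = max_after_zero_alt x
instance (x : List Int) (out : Option Int) : Decidable (Spec_max_after_zero x out) := by unfold Spec_max_after_zero; infer_instance

-- ===== CLAIM (what is proved, stated in full; the proofs are below) =====
def Claim_equal_max_after_zero : Prop := ∀ (x : List Int), Dom_max_after_zero x → Spec_max_after_zero x (max_after_zero x)

-- ===== LEMMAS AND PROOFS =====

-- the candidate at index i (value x[i] if x[i-1] == 0)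
def mazF (x : List Int) (i : Int) : Option Int :=
  if PySem.List.pyGetD x (i - 1) 0 = 0 then some (PySem.List.pyGetD x i 0) else none

-- candidates with index i in the open-above interval (lo, hi)
def candsI (x : List Int) (lo hi : Int) : List Int :=
  (PySem.List.pyRange (lo + 1) hi 1).filterMap (mazF x)

def ostep (a : Option Int) (y : Int) : Option Int :=
  some (match a with | none => y | some m => max m y)

def omax (l : List Int) : Option Int := l.foldl ostep none

def ocomb : Option Int → Option Int → Option Int
  | none, r => r
  | some a, none => some a
  | some a, some b => some (max a b)

theorem foldl_ostep_some (l : List Int) : ∀ a : Int, l.foldl ostep (some a) = some (l.foldl max a) := by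
  induction l with
  | nil => intro a; rfl
  | cons h t ih => intro a; simpa [ostep] using ih (max a h)

theorem foldl_max_max (l : List Int) : ∀ a b : Int, l.foldl max (max a b) = max a (l.foldl max b) := by
  induction l with
  | nil => intro a b; rfl
  | cons h t ih =>
    intro a b
    simp only [List.foldl_cons]
    rw [max_assoc, ih]

theorem omax_append (l1 l2 : List Int) : omax (l1 ++ l2) = ocomb (omax l1) (omax l2) := by
  cases l1 with
  | nil => simp [omax, ocomb]
  | cons h t =>
    cases l2 with
    | nil =>
      simp only [List.append_nil]
      unfold omax
      simp only [List.foldl_cons, ostep, foldl_ostep_some, ocomb]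
      rfl
    | cons h2 t2 =>
      unfold omax
      simp only [List.cons_append, List.foldl_cons, ostep, foldl_ostep_some, ocomb]
      rw [List.foldl_append]
      simp only [List.foldl_cons, foldl_max_max]

-- B's recursion computes omax of the interval's candidates
theorem mazRec_eq (x : List Int) : ∀ (n : Nat) (lo hi : Int), (hi - lo).toNat = n →
    mazRec x lo hi = omax (candsI x lo hi) := by
  intro n
  induction n using Nat.strong_induction_on with
  | _ n ih =>
    intro lo hi hn
    rw [mazRec]
    by_cases h2 : hi - lo < 2
    · rw [if_pos h2]
      unfold candsI
      rw [PySem.List.pyRange_one_eq_nil (by omega)]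
      rfl
    · rw [if_neg h2]
      by_cases he : hi - lo = 2
      · rw [if_pos he]
        have hh : hi = (lo + 1) + 1 := by omega
        subst hh
        unfold candsI
        rw [PySem.List.pyRange_one_singleton]
        have hf : mazF x (lo + 1)
            = if PySem.List.pyGetD x lo 0 = 0 then some (PySem.List.pyGetD x (lo + 1) 0) else none := by
          unfold mazF
          rw [show lo + 1 - 1 = lo from by ring]
        simp only [List.filterMap_cons, List.filterMap_nil, hf]
        by_cases h0 : PySem.List.pyGetD x lo 0 = 0
        · rw [if_pos h0]; rfl
        · rw [if_neg h0]; rfl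
      · rw [if_neg he]
        have hmid : PySem.Int.floordiv (lo + hi) 2 = (lo + hi) / 2 :=
          PySem.Int.floordiv_eq_ediv_of_pos (by omega)
        simp only [hmid]
        set mid := (lo + hi) / 2 with hm
        have hb1 : lo + 1 ≤ mid + 1 := by omega
        have hb2 : mid + 1 ≤ hi := by omega
        have hsplit : PySem.List.pyRange (lo + 1) hi 1
            = PySem.List.pyRange (lo + 1) (mid + 1) 1 ++ PySem.List.pyRange (mid + 1) hi 1 :=
          PySem.List.pyRange_one_append _ _ _ hb1 hb2
        have hL := ih (mid + 1 - lo).toNat (by omega) lo (mid + 1) rfl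
        have hR := ih (hi - mid).toNat (by omega) mid hi rfl
        have hcsplit : candsI x lo hi = candsI x lo (mid + 1) ++ candsI x mid hi := by
          unfold candsI
          rw [hsplit, List.filterMap_append]
        rw [hL, hR, hcsplit, omax_append]
        cases omax (candsI x lo (mid + 1)) <;> cases omax (candsI x mid hi) <;> rfl

-- loop invariant of A's fold after processing indices 1..k
theorem maz_inv (x : List Int) (k : Nat) (hk : (k : Int) < (x.length : Int)) :
    ((PySem.List.pyRange 1 (1 + (k : Int)) 1).foldl (mazStep x) (-1) = -1 ∧ candsI x 0 (1 + (k : Int)) = []) ∨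
    (∃ ind : Int, (PySem.List.pyRange 1 (1 + (k : Int)) 1).foldl (mazStep x) (-1) = ind ∧
      0 < ind ∧ ind ≤ (k : Int) ∧
      omax (candsI x 0 (1 + (k : Int))) = some (PySem.List.pyGetD x ind 0)) := by
  induction k with
  | zero =>
    left
    constructor
    · rw [PySem.List.pyRange_one_eq_nil (by omega)]
      rfl
    · unfold candsI
      rw [PySem.List.pyRange_one_eq_nil (by omega)]
      rfl
  | succ k ih =>
    have hk' : (k : Int) < (x.length : Int) := by push_cast at hk ⊢; omega
    have hcast : (1 : Int) + ((k + 1 : Nat) : Int) = (1 + (k : Int)) + 1 := by push_cast; ring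
    have hrange : PySem.List.pyRange 1 (1 + ((k + 1 : Nat) : Int)) 1
        = PySem.List.pyRange 1 (1 + (k : Int)) 1 ++ [1 + (k : Int)] := by
      rw [hcast, PySem.List.pyRange_one_succ_right (by omega)]
    have hrange0 : PySem.List.pyRange (0 + 1) (1 + ((k + 1 : Nat) : Int)) 1
        = PySem.List.pyRange (0 + 1) (1 + (k : Int)) 1 ++ [1 + (k : Int)] := by
      simpa using hrange
    have hcands : candsI x 0 (1 + ((k + 1 : Nat) : Int))
        = candsI x 0 (1 + (k : Int)) ++ (mazF x (1 + (k : Int))).toList := by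
      unfold candsI
      rw [hrange0, List.filterMap_append]
      cases h : mazF x (1 + (k : Int)) <;> simp [h]
    have hidx : (1 : Int) + (k : Int) - 1 = (k : Int) := by ring
    rw [hrange, List.foldl_append]
    simp only [List.foldl_cons, List.foldl_nil]
    by_cases h0 : PySem.List.pyGetD x (k : Int) 0 = 0
    · -- a new candidate v = x[1+k] appears
      have hf : mazF x (1 + (k : Int)) = some (PySem.List.pyGetD x (1 + (k : Int)) 0) := by
        unfold mazF; rw [hidx, if_pos h0]
      have hstep : ∀ ind : Int, mazStep x ind (1 + (k : Int))
          = if ind = -1 ∨ PySem.List.pyGetD x ind 0 < PySem.List.pyGetD x (1 + (k : Int)) 0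
            then 1 + (k : Int) else ind := by
        intro ind
        unfold mazStep
        rw [hidx, if_neg (by simp [h0])]
      rcases ih hk' with ⟨hfold, hc⟩ | ⟨ind, hfold, hpos, hle, hval⟩
      · right
        refine ⟨1 + (k : Int), ?_, by omega, by push_cast; omega, ?_⟩
        · rw [hfold, hstep]; simp
        · rw [hcands, hc, hf]; rfl
      · right
        rw [hfold, hstep]
        have homax : omax (candsI x 0 (1 + ((k + 1 : Nat) : Int)))
            = ocomb (some (PySem.List.pyGetD x ind 0)) (some (PySem.List.pyGetD x (1 + (k : Int)) 0)) := by
          rw [hcands, hf, omax_append, hval]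
          rfl
        by_cases hlt : PySem.List.pyGetD x ind 0 < PySem.List.pyGetD x (1 + (k : Int)) 0
        · refine ⟨1 + (k : Int), by simp [hlt], by omega, by push_cast; omega, ?_⟩
          rw [homax]
          simp only [ocomb]
          rw [max_eq_right (le_of_lt hlt)]
        · have hne : ¬ (ind = -1 ∨ PySem.List.pyGetD x ind 0 < PySem.List.pyGetD x (1 + (k : Int)) 0) := by
            rintro (h | h)
            · omega
            · exact hlt h
          refine ⟨ind, by simp [hne], hpos, by push_cast; omega, ?_⟩
          rw [homax]
          simp only [ocomb]
          rw [max_eq_left (not_lt.mp hlt)]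
    · -- no new candidate: the step keeps ind, the candidate list is unchanged
      have hf : mazF x (1 + (k : Int)) = none := by
        unfold mazF; rw [hidx, if_neg h0]
      have hstep : ∀ ind : Int, mazStep x ind (1 + (k : Int)) = ind := by
        intro ind
        unfold mazStep
        rw [hidx, if_pos h0]
      have hcands' : candsI x 0 (1 + ((k + 1 : Nat) : Int)) = candsI x 0 (1 + (k : Int)) := by
        rw [hcands, hf]; simp
      rcases ih hk' with ⟨hfold, hc⟩ | ⟨ind, hfold, hpos, hle, hval⟩
      · left; exact ⟨by rw [hfold, hstep], by rw [hcands', hc]⟩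
      · right
        exact ⟨ind, by rw [hfold, hstep], hpos, by push_cast; omega, by rw [hcands']; exact hval⟩

-- ===== VERDICT (by name: the statement is the Claim_ definition above) =====
theorem max_after_zero_spec : Claim_equal_max_after_zero := by
  intro x _
  unfold Spec_max_after_zero max_after_zero max_after_zero_alt
  rw [mazRec_eq x ((x.length : Int) - 0).toNat 0 (x.length : Int) rfl]
  by_cases hlen : x.length ≤ 1
  · rw [PySem.List.pyRange_one_eq_nil (by exact_mod_cast hlen)]
    simp only [List.foldl_nil, reduceIte]
    unfold candsI
    rw [PySem.List.pyRange_one_eq_nil (by push_cast; omega)]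
    rfl
  · have h1 : 1 ≤ x.length := by omega
    have hcast : (1 : Int) + ((x.length - 1 : Nat) : Int) = (x.length : Int) := by
      push_cast [h1]; ring
    have hk : ((x.length - 1 : Nat) : Int) < (x.length : Int) := by
      push_cast [h1]; omega
    have hc0 : candsI x 0 (1 + ((x.length - 1 : Nat) : Int)) = candsI x 0 (x.length : Int) := by
      rw [hcast]
    rcases maz_inv x (x.length - 1) hk with ⟨hfold, hc⟩ | ⟨ind, hfold, hpos, hle, hval⟩
    · rw [hcast] at hfold
      rw [hfold]
      simp only [reduceIte]
      rw [← hc0, hc]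
      rfl
    · rw [hcast] at hfold
      rw [hfold, if_neg (by omega)]
      rw [← hc0, hval]
      have hindlt : ind < (x.length : Int) := by
        push_cast [h1] at hle ⊢; omega
      rw [PySem.List.pyGet?_eq_some_getElem x (by omega) hindlt,
          ← PySem.List.pyGetD_eq_getElem x 0 (by omega) hindlt]
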